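-- pv_equiv track=rewrite | github.com/AceCentre/AAC-Corpora-Collecting | Grid3/GridAnalysisDetailed.py | analyze_texts
-- ===== SOURCE A (Python) =====
-- from collections import Counter
--
-- def analyze_texts(text_list):
--     # NB: Not really using any more but maybe useful in the future.
--     word_count = Counter()
--     phrase_count = 0
--     for text in text_list:
--         words = text.split()
--         if len(words) > 1:
--             phrase_count += 1
--         word_count.update(words)
--     return word_count, phrase_count
-- ===== SOURCE B (Python) =====
-- from collections import Counter
--
-- def analyze_texts(text_list):
--     # Sort-then-scan: sort the flattened token stream, read each word's count off
--     # the length of its run of equal neighbours, then order the result by first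
--     # occurrence; phrases counted separately over the splits.
--     splits = [t.split() for t in text_list]
--     tokens = [w for ws in splits for w in ws]
--     st = sorted(tokens)
--     counts = {}
--     i = 0
--     n = len(st)
--     while i < n:
--         j = i + 1
--         while j < n and st[j] == st[i]:
--             j += 1
--         counts[st[i]] = j - i
--         i = j
--     word_count = Counter({w: counts.get(w, 0) for w in dict.fromkeys(tokens)})
--     phrase_count = len([ws for ws in splits if len(ws) > 1])
--     return word_count, phrase_count
-- ===== Notes on version B (the rewrite author's own statement) =====
-- stated objective: alternative
-- what changed: Instead of A's single fused loop that incrementally tallies a Counter per text, B flattens all tokens, sorts them and reads each word's count off the length of its run of equal neighbours (sort-then-scan run-length counting), reassembling the result in first-occurrence order, with the phrase count as a separate filtered length over the splits.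
import Mathlib
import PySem

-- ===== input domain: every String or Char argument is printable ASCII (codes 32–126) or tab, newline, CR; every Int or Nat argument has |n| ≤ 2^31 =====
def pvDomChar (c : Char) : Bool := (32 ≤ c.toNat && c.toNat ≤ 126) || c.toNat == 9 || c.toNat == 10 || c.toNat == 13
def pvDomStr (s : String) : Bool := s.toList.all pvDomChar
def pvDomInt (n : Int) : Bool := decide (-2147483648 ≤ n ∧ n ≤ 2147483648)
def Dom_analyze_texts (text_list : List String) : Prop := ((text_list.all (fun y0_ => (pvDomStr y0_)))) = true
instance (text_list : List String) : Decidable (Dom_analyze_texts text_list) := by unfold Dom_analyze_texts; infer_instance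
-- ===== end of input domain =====

-- B replaces A's fused incremental Counter loop by sort-then-scan run-length counting over
-- the flattened token stream, reassembled in first-occurrence order, with the phrase count
-- as a separate filtered length; alternative algorithm.

-- ===== PORT A =====
def analyze_texts (text_list : List String) : (List (String × Int)) × Int :=
  let st := text_list.foldl
    (fun (acc : PySem.Dict String Int × Int) text =>
      let words := PySem.Str.split₀ text
      let pc := if words.length > 1 then acc.2 + 1 else acc.2
      -- word_count.update(words)
      let wc := words.foldl (fun d w => d.modify w 0 (· + 1)) acc.1
      (wc, pc))
    (PySem.Dict.empty, 0)
  (st.1.items, st.2)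

-- ===== PORT B =====
-- B's run-length scan over the sorted token list: the outer while loop emits, for each run
-- of equal adjacent words, the word and the run's length (j - i = 1 + length of the
-- remaining equal prefix, which the inner while loop measures).
def runsB (l : List String) : List (String × Int) :=
  match l with
  | [] => []
  | x :: xs =>
      (x, 1 + ((xs.takeWhile (fun w => w == x)).length : Int))
        :: runsB (xs.dropWhile (fun w => w == x))
termination_by l.length
decreasing_by
  simpa using Nat.lt_succ_of_le (List.length_dropWhile_le _ _)

def analyze_texts_alt (text_list : List String) : (List (String × Int)) × Int :=
  let splits := text_list.map PySem.Str.split₀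
  let tokens := splits.flatten
  let st := PySem.List.sorted tokens (fun w => w) false
  -- counts = {}; while i < n: … counts[st[i]] = j - i …  (runs inserted in order)
  let counts := (runsB st).foldl (fun d p => d.insert p.1 p.2) PySem.Dict.empty
  let word_count := (PySem.List.dedup tokens).map (fun w => (w, counts.getD w 0))
  let phrase_count : Int := ((splits.filter (fun ws => ws.length > 1)).length : Int)
  (word_count, phrase_count)

-- ===== PRECONDITION & SPEC =====
def Spec_analyze_texts (text_list : List String) (out : (List (String × Int)) × Int) : Prop := out = analyze_texts_alt text_list
instance (text_list : List String) (out : (List (String × Int)) × Int) : Decidable (Spec_analyze_texts text_list out) := by unfold Spec_analyze_texts; infer_instance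

-- ===== CLAIM =====
def Claim_equal_analyze_texts : Prop := ∀ (text_list : List String), Dom_analyze_texts text_list → Spec_analyze_texts text_list (analyze_texts text_list)

-- ===== LEMMAS AND PROOFS =====
-- Loop invariant for A: the fold over `ts` from state (d, p) yields the counter-fold of all
-- tokens of `ts` over d, and p plus the number of multi-word texts of `ts`.
theorem analyze_texts_fold_inv (ts : List String) (d : PySem.Dict String Int) (p : Int) :
    ts.foldl
      (fun (acc : PySem.Dict String Int × Int) text =>
        let words := PySem.Str.split₀ text
        let pc := if words.length > 1 then acc.2 + 1 else acc.2
        let wc := words.foldl (fun d w => d.modify w 0 (· + 1)) acc.1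
        (wc, pc))
      (d, p)
    = ((ts.flatMap PySem.Str.split₀).foldl (fun d w => d.modify w 0 (· + 1)) d,
       p + (((ts.map PySem.Str.split₀).filter (fun w => w.length > 1)).length : Int)) := by
  induction ts generalizing d p with
  | nil => simp
  | cons t ts ih =>
    simp only [List.foldl_cons, List.flatMap_cons, List.map_cons, List.filter_cons,
      List.foldl_append, ih]
    by_cases h : (PySem.Str.split₀ t).length > 1 <;>
      simp [h]; ring

-- In a sorted list, the head's run is everything equal to it: the head never reappears
-- after the equal prefix is dropped.
theorem runsB_not_mem_dropWhile (x : String) (xs : List String)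
    (hle : ∀ y ∈ xs, x ≤ y) (hs : xs.Pairwise (· ≤ ·)) :
    x ∉ xs.dropWhile (fun w => w == x) := by
  induction xs with
  | nil => simp
  | cons a t ih =>
    rw [List.dropWhile_cons]
    by_cases ha : (a == x) = true
    · rw [if_pos ha]
      exact ih (fun y hy => hle y (List.mem_cons_of_mem _ hy)) hs.of_cons
    · rw [if_neg ha]
      intro hmem
      have hax : a ≠ x := by simpa using ha
      rcases List.mem_cons.1 hmem with rfl | hxt
      · exact hax rfl
      · exact hax (le_antisymm ((List.pairwise_cons.1 hs).1 x hxt) (hle a List.mem_cons_self))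

-- Every key emitted by the run scan is an element of the scanned list.
theorem runsB_keys_sub (l : List String) : ∀ p ∈ runsB l, p.1 ∈ l := by
  induction l using runsB.induct with
  | case1 => simp [runsB]
  | case2 x xs ih =>
    intro p hp
    rw [runsB] at hp
    rcases List.mem_cons.1 hp with rfl | h
    · exact List.mem_cons_self
    · exact List.mem_cons_of_mem _ ((List.dropWhile_sublist _).subset (ih p h))

-- On a sorted list the run scan emits each element with its multiplicity.
theorem runsB_mem (l : List String) (hs : l.Pairwise (· ≤ ·)) :
    ∀ w ∈ l, (w, (l.count w : Int)) ∈ runsB l := by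
  induction l using runsB.induct with
  | case1 => simp
  | case2 x xs ih =>
    intro w hw
    have hle : ∀ y ∈ xs, x ≤ y := (List.pairwise_cons.1 hs).1
    have hnd : x ∉ xs.dropWhile (fun w => w == x) :=
      runsB_not_mem_dropWhile x xs hle hs.of_cons
    have hsdw : (xs.dropWhile (fun w => w == x)).Pairwise (· ≤ ·) :=
      hs.of_cons.sublist (List.dropWhile_sublist _)
    have htw : ∀ y ∈ xs.takeWhile (fun w => w == x), y = x := by
      intro y hy
      simpa using List.mem_takeWhile_imp hy
    have hsplit : xs.takeWhile (fun w => w == x) ++ xs.dropWhile (fun w => w == x) = xs :=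
      List.takeWhile_append_dropWhile
    have hcx : (x :: xs).count x = 1 + (xs.takeWhile (fun y => y == x)).length := by
      have h2 : xs.count x = (xs.takeWhile (fun y => y == x)).length := by
        conv_lhs => rw [← hsplit]
        rw [List.count_append, List.count_eq_zero.2 hnd,
          List.count_eq_length.2 (fun y hy => (htw y hy).symm)]
        omega
      rw [List.count_cons_self, h2]
      omega
    rw [runsB]
    rcases List.mem_cons.1 hw with rfl | hxt
    · rw [hcx]
      push_cast
      exact List.mem_cons_self
    · by_cases hwx : w = x
      · subst hwx
        rw [hcx]
        push_cast
        exact List.mem_cons_self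
      · have hwdw : w ∈ xs.dropWhile (fun y => y == x) := by
          rcases (List.mem_append.1 (by rw [hsplit]; exact hxt)) with h1 | h2
          · exact absurd (htw w h1) hwx
          · exact h2
        have hc : (x :: xs).count w = (xs.dropWhile (fun y => y == x)).count w := by
          have h2 : xs.count w = (xs.dropWhile (fun y => y == x)).count w := by
            conv_lhs => rw [← hsplit]
            rw [List.count_append,
              List.count_eq_zero.2 (fun h => hwx (htw w h))]
            omega
          rw [List.count_cons_of_ne (Ne.symm hwx), h2]
        rw [hc]
        exact List.mem_cons_of_mem _ (ih hsdw w hwdw)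

-- On a sorted list the emitted keys are distinct.
theorem runsB_keys_nodup (l : List String) (hs : l.Pairwise (· ≤ ·)) :
    ((runsB l).map Prod.fst).Nodup := by
  induction l using runsB.induct with
  | case1 => simp [runsB]
  | case2 x xs ih =>
    have hle : ∀ y ∈ xs, x ≤ y := (List.pairwise_cons.1 hs).1
    have hnd : x ∉ xs.dropWhile (fun w => w == x) :=
      runsB_not_mem_dropWhile x xs hle hs.of_cons
    have hsdw : (xs.dropWhile (fun w => w == x)).Pairwise (· ≤ ·) :=
      hs.of_cons.sublist (List.dropWhile_sublist _)
    rw [runsB]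
    refine List.nodup_cons.2 ⟨?_, ih hsdw⟩
    intro hx
    rcases List.mem_map.1 hx with ⟨p, hp, hpx⟩
    have hpx' : p.1 = x := hpx
    have hmem := runsB_keys_sub _ p hp
    rw [hpx'] at hmem
    exact hnd hmem

-- Looking a word up in B's counts dict gives its multiplicity in the sorted token list.
theorem runsB_getD (l : List String) (hs : l.Pairwise (· ≤ ·)) (w : String) (hw : w ∈ l) :
    ((runsB l).foldl (fun d p => d.insert p.1 p.2) PySem.Dict.empty).getD w 0
      = (l.count w : Int) := by
  have hitems : ((runsB l).foldl (fun d p => d.insert p.1 p.2) PySem.Dict.empty).items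
      = runsB l := by
    rw [PySem.Dict.items_foldl_insert_fresh (runsB l) Prod.fst Prod.snd PySem.Dict.empty
      (fun a _ => by simp) (runsB_keys_nodup l hs)]
    simp [PySem.Dict.empty]
  have hkeys : ((runsB l).foldl (fun d p => d.insert p.1 p.2) PySem.Dict.empty).keys.Nodup := by
    simp only [PySem.Dict.keys, hitems]
    exact runsB_keys_nodup l hs
  exact PySem.Dict.getD_of_mem_items _ (by rw [hitems]; exact runsB_mem l hs w hw) hkeys 0

-- ===== VERDICT =====
theorem analyze_texts_spec : Claim_equal_analyze_texts := by
  intro text_list _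
  unfold Spec_analyze_texts analyze_texts analyze_texts_alt
  simp only [analyze_texts_fold_inv, zero_add]
  rw [← PySem.Dict.counter_eq_foldl, PySem.Dict.items_counter]
  refine Prod.ext ?_ ?_
  · simp only [List.flatten_eq_flatMap, List.flatMap_map, id_eq]
    rw [← PySem.List.dedup_eq_ofList]
    refine List.map_congr_left fun w hw => ?_
    have hwmem : w ∈ text_list.flatMap PySem.Str.split₀ := (PySem.List.mem_dedup _ _).1 hw
    have hst : w ∈ PySem.List.sorted (text_list.flatMap PySem.Str.split₀) (fun w => w) false :=
      (PySem.List.mem_sorted _ _ _ _).2 hwmem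
    rw [runsB_getD _ (PySem.List.sorted_pairwise _ _) w hst,
      (PySem.List.sorted_perm _ _ _).count_eq]
  · simp
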